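-- pv_equiv track=rewrite | github.com/dhanushraghava2004/scrapper | Profile_scrapper.py | _pick_location
-- ===== SOURCE A (Python) =====
-- from typing import List, Dict, Any, Optional
--
-- PRONOUN_TOKENS = {
--     "he/him", "she/her", "they/them", "he • him", "she • her", "they • them"
-- }
--
-- def _pick_location(candidates: List[str]) -> Optional[str]:
--     """Choose the most location-like string (skip pronouns)."""
--     for c in candidates:
--         t = (c or "").strip()
--         if not t:
--             continue
--         tl = t.lower()
--         if tl in PRONOUN_TOKENS:
--             continue
--         if ("," in t) or any(k in tl for k in [
--             "india","united","usa","uk","uae","germany","canada","australia",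
--             "hyderabad","bengaluru","mumbai","delhi","pune","chennai",
--             "gurgaon","noida","kolkata","ahmedabad","coimbatore",
--             "trivandrum","vizag","mysuru","texas","united states"
--         ]):
--             return t
--     for t in candidates:
--         tl = (t or "").lower().strip()
--         if tl and tl not in PRONOUN_TOKENS:
--             return t
--     return None
-- ===== SOURCE B (Python) =====
-- from typing import List, Optional
--
-- PRONOUN_TOKENS = {
--     "he/him", "she/her", "they/them", "he • him", "she • her", "they • them"
-- }
--
-- _KEYWORDS = [
--     "india","united","usa","uk","uae","germany","canada","australia",
--     "hyderabad","bengaluru","mumbai","delhi","pune","chennai",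
--     "gurgaon","noida","kolkata","ahmedabad","coimbatore",
--     "trivandrum","vizag","mysuru","texas","united states"
-- ]
--
--
-- def _pick_location(candidates: List[str]) -> Optional[str]:
--     """Choose the most location-like string (skip pronouns)."""
--     hit = fb = None
--     # walk BACKWARDS: overwriting on every valid element makes the earliest one win
--     for c in reversed(candidates):
--         t = (c or "").strip()
--         if not t:
--             continue
--         tl = t.lower()
--         if tl in PRONOUN_TOKENS:
--             continue
--         if ("," in t) or any(k in tl for k in _KEYWORDS):
--             hit = t
--         fb = c
--     return hit if hit is not None else fb
-- ===== Notes on version B (the rewrite author's own statement) =====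
-- stated objective: alternative
-- what changed: Replaced A's two sequential forward first-match loops by one backward traversal that overwrites a (hit, fallback) accumulator pair on every valid element, so last-write-wins yields the first match; no early return and no second pass.
import Mathlib
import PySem

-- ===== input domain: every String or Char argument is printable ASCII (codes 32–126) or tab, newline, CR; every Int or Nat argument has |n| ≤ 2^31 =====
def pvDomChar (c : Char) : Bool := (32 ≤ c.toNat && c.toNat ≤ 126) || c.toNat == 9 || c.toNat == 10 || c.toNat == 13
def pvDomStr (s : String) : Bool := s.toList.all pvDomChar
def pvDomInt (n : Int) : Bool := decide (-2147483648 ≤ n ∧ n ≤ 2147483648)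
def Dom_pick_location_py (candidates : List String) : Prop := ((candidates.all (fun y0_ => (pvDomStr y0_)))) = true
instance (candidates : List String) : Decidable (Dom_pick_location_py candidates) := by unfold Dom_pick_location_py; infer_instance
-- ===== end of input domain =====

-- B replaces A's two forward first-match loops by one backward fold over the reversed list threading a (hit, fallback) pair; alternative decomposition, same cost.


-- ===== PORT A =====
-- PRONOUN_TOKENS : a Python set of distinct string literals → list of its distinct elements
def pronounTokens : List String :=
  ["he/him", "she/her", "they/them", "he • him", "she • her", "they • them"]

-- the keyword list literal inside A's `any(...)`
def locKeywords : List String :=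
  ["india","united","usa","uk","uae","germany","canada","australia",
   "hyderabad","bengaluru","mumbai","delhi","pune","chennai",
   "gurgaon","noida","kolkata","ahmedabad","coimbatore",
   "trivandrum","vizag","mysuru","texas","united states"]

-- first Python loop of A ('c or ""' is 'c' itself: c is a str, and '"" or ""' is "")
def pickLoop1 : List String → Option String
  | [] => none
  | c :: rest =>
    let t := PySem.Str.strip c
    if t == "" then pickLoop1 rest
    else
      let tl := PySem.Str.lower t
      if pronounTokens.contains tl then pickLoop1 rest
      else if PySem.Str.isIn "," t || locKeywords.any (fun k => PySem.Str.isIn k tl) then some t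
      else pickLoop1 rest

-- second Python loop of A
def pickLoop2 : List String → Option String
  | [] => none
  | c :: rest =>
    let tl := PySem.Str.strip (PySem.Str.lower c)
    if tl != "" && !(pronounTokens.contains tl) then some c else pickLoop2 rest

def pick_location_py (candidates : List String) : Option String :=
  match pickLoop1 candidates with
  | some t => some t
  | none => pickLoop2 candidates

-- ===== PORT B =====
-- one step of B's backward loop over state (hit, fb)
def pickStep (st : Option String × Option String) (c : String) : Option String × Option String :=
  let t := PySem.Str.strip c
  if t == "" then st
  else
    let tl := PySem.Str.lower t
    if pronounTokens.contains tl then st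
    else
      ((if PySem.Str.isIn "," t || locKeywords.any (fun k => PySem.Str.isIn k tl)
        then some t else st.1),
       some c)

def pick_location_py_alt (candidates : List String) : Option String :=
  let st := candidates.reverse.foldl pickStep (none, none)
  match st.1 with
  | some h => some h
  | none => st.2

-- ===== PRECONDITION & SPEC =====
def Spec_pick_location_py (candidates : List String) (out : Option String) : Prop := out = pick_location_py_alt candidates
instance (candidates : List String) (out : Option String) : Decidable (Spec_pick_location_py candidates out) := by unfold Spec_pick_location_py; infer_instance

-- ===== CLAIM (what is proved, stated in full; the proofs are below) =====
def Claim_equal_pick_location_py : Prop := ∀ (candidates : List String), Dom_pick_location_py candidates → Spec_pick_location_py candidates (pick_location_py candidates)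

-- ===== LEMMAS AND PROOFS =====

-- lowering a character never changes whether it is Python-whitespace
theorem isspace_lowerChar (c : Char) :
    PySem.Chars.isspace (PySem.Chars.lowerChar c) = PySem.Chars.isspace c := by
  unfold PySem.Chars.lowerChar
  split
  · rename_i h
    simp only [PySem.Chars.isupper, Bool.and_eq_true, decide_eq_true_eq] at h
    have h1 : 65 ≤ c.toNat := h.1
    have h2 : c.toNat ≤ 90 := h.2
    have hv : (Char.ofNat (c.toNat + 32)).toNat = c.toNat + 32 := by
      rw [Char.toNat_ofNat, if_pos (Or.inl (by omega))]
    rw [Bool.eq_iff_iff]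
    simp only [PySem.Chars.isspace, hv, Bool.or_eq_true, Bool.and_eq_true, decide_eq_true_eq]
    omega
  · rfl

theorem chars_strip_lower_comm (l : List Char) :
    PySem.Chars.strip (PySem.Chars.lower l) = PySem.Chars.lower (PySem.Chars.strip l) := by
  have hfun : (fun c => PySem.Chars.isspace (PySem.Chars.lowerChar c)) = PySem.Chars.isspace := by
    funext c; exact isspace_lowerChar c
  simp only [PySem.Chars.strip, PySem.Chars.lstrip, PySem.Chars.rstrip, PySem.Chars.lower]
  rw [List.dropWhile_map]
  simp only [Function.comp_def, hfun]
  rw [← List.map_reverse, List.dropWhile_map]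
  simp only [Function.comp_def, hfun, List.map_reverse]

theorem str_strip_lower_comm (s : String) :
    PySem.Str.strip (PySem.Str.lower s) = PySem.Str.lower (PySem.Str.strip s) := by
  simp only [PySem.Str.strip, PySem.Str.lower, String.toList_ofList]
  rw [chars_strip_lower_comm]

theorem str_lower_eq_empty_iff (s : String) : (PySem.Str.lower s = "") ↔ s = "" := by
  simp only [PySem.Str.lower, PySem.Chars.lower]
  constructor
  · intro h
    have : (String.ofList (s.toList.map PySem.Chars.lowerChar)).toList = [] := by rw [h]; rfl
    simp only [String.toList_ofList, List.map_eq_nil_iff] at this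
    have := congrArg String.ofList this
    simpa using this
  · intro h; subst h; rfl

-- B's backward fold computes exactly (A's pass 1, A's pass 2)
theorem foldr_step_eq (cs : List String) :
    cs.foldr (fun c st => pickStep st c) (none, none) = (pickLoop1 cs, pickLoop2 cs) := by
  induction cs with
  | nil => rfl
  | cons c rest ih =>
    rw [List.foldr_cons, ih]
    simp only [pickStep, pickLoop1, pickLoop2]
    rw [str_strip_lower_comm c]
    split_ifs with h1 h2 h3 <;>
      simp_all [bne, str_lower_eq_empty_iff]

-- ===== VERDICT (by name: the statement is the Claim_ definition above) =====
theorem pick_location_py_spec : Claim_equal_pick_location_py := by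
  intro cs _
  unfold Spec_pick_location_py pick_location_py pick_location_py_alt
  rw [List.foldl_reverse, foldr_step_eq]
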